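-- pv_equiv track=rewrite | github.com/kayleemontero30-ui/Practica-General | oto/cuadricula.py | generar_tabla_caminos
-- ===== SOURCE A (Python) =====
-- def generar_tabla_caminos(m, n):
--     if m <= 0 or n <= 0:
--         return []
--
--     tabla = [[1] * n for _ in range(m)]
--
--     for i in range(1, m):
--         for j in range(1, n):
--             tabla[i][j] = tabla[i - 1][j] + tabla[i][j - 1]
--
--     return tabla
-- ===== SOURCE B (Python) =====
-- def generar_tabla_caminos(m, n):
--     # Each row is computed independently from the closed form C(i+j, i),
--     # built with the exact multiplicative running binomial (no neighbour cells).
--     if m <= 0 or n <= 0: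
--         return []
--     filas = []
--     for i in range(m):
--         fila = [1]
--         c = 1
--         for j in range(1, n):
--             c = c * (i + j) // j
--             fila.append(c)
--         filas.append(fila)
--     return filas
-- ===== Notes on version B (the rewrite author's own statement) =====
-- stated objective: alternative
-- what changed: B computes every row independently from the closed form C(i+j,i) via an exact multiplicative running binomial (c = c*(i+j)//j), instead of A's dynamic-programming table where each cell is the sum of its top and left neighbours.
import Mathlib
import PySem

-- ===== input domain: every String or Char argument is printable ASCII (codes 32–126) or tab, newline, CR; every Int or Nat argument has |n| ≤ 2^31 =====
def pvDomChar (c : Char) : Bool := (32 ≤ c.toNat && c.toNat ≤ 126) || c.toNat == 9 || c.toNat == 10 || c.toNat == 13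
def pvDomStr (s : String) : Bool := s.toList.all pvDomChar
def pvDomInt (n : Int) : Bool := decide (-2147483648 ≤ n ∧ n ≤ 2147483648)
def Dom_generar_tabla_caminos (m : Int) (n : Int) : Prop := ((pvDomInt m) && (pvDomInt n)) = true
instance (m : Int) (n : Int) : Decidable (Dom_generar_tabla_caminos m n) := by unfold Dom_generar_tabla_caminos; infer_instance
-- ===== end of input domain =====

-- B builds each row independently from the closed form C(i+j,i) (exact multiplicative running
-- binomial) instead of A's DP table of neighbour sums; same cost, different algorithm.

-- ===== PORT A =====
-- '[1] * n' is List.replicate n.toNat 1 (exact for every n: a nonpositive n gives []).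
-- All indices come from range(1, m)/range(1, n), so they are nonnegative and in range and the
-- total forms pyGetD/pySetD are exact here (no IndexError is reachable).
def generar_tabla_caminos (m : Int) (n : Int) : List (List Int) :=
  if m ≤ 0 || n ≤ 0 then []
  else
    let tabla : List (List Int) :=
      (PySem.List.pyRange 0 m 1).map (fun _ => List.replicate n.toNat (1 : Int))
    (PySem.List.pyRange 1 m 1).foldl (fun t i =>
      (PySem.List.pyRange 1 n 1).foldl (fun t j =>
        PySem.List.pySetD t i
          (PySem.List.pySetD (PySem.List.pyGetD t i []) j
            (PySem.List.pyGetD (PySem.List.pyGetD t (i - 1) []) j 0 +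
             PySem.List.pyGetD (PySem.List.pyGetD t i []) (j - 1) 0))) t) tabla

-- ===== PORT B =====
def generar_tabla_caminos_alt (m : Int) (n : Int) : List (List Int) :=
  if m ≤ 0 || n ≤ 0 then []
  else
    (PySem.List.pyRange 0 m 1).foldl (fun filas i =>
      filas ++ [((PySem.List.pyRange 1 n 1).foldl (fun (s : List Int × Int) j =>
          let c := PySem.Int.floordiv (s.2 * (i + j)) j
          (s.1 ++ [c], c)) ([1], 1)).1]) []

-- ===== PRECONDITION & SPEC =====
def Spec_generar_tabla_caminos (m : Int) (n : Int) (out : List (List Int)) : Prop := out = generar_tabla_caminos_alt m n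
instance (m : Int) (n : Int) (out : List (List Int)) : Decidable (Spec_generar_tabla_caminos m n out) := by unfold Spec_generar_tabla_caminos; infer_instance

-- ===== CLAIM (what is proved, stated in full; the proofs are below) =====
def Claim_equal_generar_tabla_caminos : Prop := ∀ (m : Int) (n : Int), Dom_generar_tabla_caminos m n → Spec_generar_tabla_caminos m n (generar_tabla_caminos m n)

-- ===== LEMMAS AND PROOFS =====

-- the common target: the table of binomial coefficients C(i+j, i)
def combRow (a n : Nat) : List Int := (List.range n).map (fun j => ((a + j).choose a : Int))
def combTab (m n : Nat) : List (List Int) := (List.range m).map (fun r => combRow r n)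

lemma combRow_length (a n : Nat) : (combRow a n).length = n := by simp [combRow]

lemma combRow_getElem (a n j : Nat) (h : j < n) :
    (combRow a n)[j]'(by simp [combRow]; omega) = ((a + j).choose a : Int) := by
  simp [combRow]

lemma combRow_zero (n : Nat) : combRow 0 n = List.replicate n 1 := by
  apply List.ext_getElem <;> simp [combRow]

-- ----- B's side -----

-- multiplicative identity behind B's running product c = c * (i + j) // j
lemma choose_mul_key (a k : Nat) :
    (a + k).choose a * (a + k + 1) = (a + k + 1).choose a * (k + 1) := by
  have h1 := Nat.add_one_mul_choose_eq (a + k) k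
  have h2 : (a + k).choose k = (a + k).choose a := by
    have := Nat.choose_symm (n := a + k) (k := a) (by omega)
    simpa [Nat.add_sub_cancel_left] using this
  have h3 : (a + k + 1).choose (k + 1) = (a + k + 1).choose a := by
    have := Nat.choose_symm (n := a + k + 1) (k := a) (by omega)
    have e : a + k + 1 - a = k + 1 := by omega
    rw [e] at this
    exact this
  calc (a + k).choose a * (a + k + 1)
      = (a + k + 1) * (a + k).choose k := by rw [h2]; ring
    _ = (a + k + 1).choose (k + 1) * (k + 1) := h1
    _ = (a + k + 1).choose a * (k + 1) := by rw [h3]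

-- B's inner loop builds combRow
lemma rowB (a k : Nat) :
    (PySem.List.pyRange 1 ((k : Int) + 1) 1).foldl (fun (s : List Int × Int) j =>
        let c := PySem.Int.floordiv (s.2 * ((a : Int) + j)) j
        (s.1 ++ [c], c)) ([1], 1)
      = (combRow a (k + 1), ((a + k).choose a : Int)) := by
  induction k with
  | zero =>
      rw [PySem.List.pyRange_one_eq_nil (by norm_num)]
      simp [combRow]
  | succ k ih =>
      rw [show ((k + 1 : Nat) : Int) + 1 = ((k : Int) + 1) + 1 by push_cast; ring,
          PySem.List.pyRange_one_succ_right (by omega), List.foldl_append, ih]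
      have hc : PySem.Int.floordiv (((a + k).choose a : Int) * ((a : Int) + ((k : Int) + 1))) ((k : Int) + 1)
          = ((a + (k + 1)).choose a : Int) := by
        have hnum : ((a + k).choose a : Int) * ((a : Int) + ((k : Int) + 1))
            = (((a + k).choose a * (a + k + 1) : Nat) : Int) := by push_cast; ring
        have hden : ((k : Int) + 1) = (((k + 1 : Nat)) : Int) := by push_cast; ring
        rw [hnum, hden, choose_mul_key a k, PySem.Int.floordiv_natCast]
        rw [Nat.mul_div_cancel _ (by omega)]
        norm_cast
      simp only [List.foldl_cons, List.foldl_nil]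
      simp only [hc]
      have he : combRow a (k + 1 + 1) = combRow a (k + 1) ++ [((a + (k + 1)).choose a : Int)] := by
        simp [combRow, List.range_succ]
      rw [he]

lemma altB (m n : Int) (hm : 0 < m) (hn : 0 < n) :
    generar_tabla_caminos_alt m n = combTab m.toNat n.toNat := by
  unfold generar_tabla_caminos_alt
  rw [if_neg (by simp; omega)]
  rw [PySem.List.foldl_append_singleton_eq_map]
  rw [PySem.List.pyRange_one 0 m]
  simp only [List.map_map, Int.sub_zero]
  unfold combTab
  apply List.map_congr_left
  intro r hr
  simp only [Function.comp]
  have hn' : (n : Int) = ((n.toNat - 1 : Nat) : Int) + 1 := by omega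
  have hr' : ((0 : Int) + (r : Int)) = ((r : Nat) : Int) := by omega
  rw [hr', hn', rowB r (n.toNat - 1)]
  show combRow r (n.toNat - 1 + 1) = combRow r (((n.toNat - 1 : Nat) : Int) + 1).toNat
  congr 1

-- ----- A's side -----

-- A's inner loop, viewed as a fold over the single row it rewrites
def rowAstep (prev : List Int) (c : List Int) (j : Int) : List Int :=
  PySem.List.pySetD c j (PySem.List.pyGetD prev j 0 + PySem.List.pyGetD c (j - 1) 0)

lemma tableInner_aux (js : List Int) (i : Int)
    (hi0 : 0 < i) (t : List (List Int)) (hil : i.toNat < t.length) (c : List Int) :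
    js.foldl (fun t j =>
        PySem.List.pySetD t i
          (PySem.List.pySetD (PySem.List.pyGetD t i []) j
            (PySem.List.pyGetD (PySem.List.pyGetD t (i - 1) []) j 0 +
             PySem.List.pyGetD (PySem.List.pyGetD t i []) (j - 1) 0))) (t.set i.toNat c)
      = t.set i.toNat (js.foldl (rowAstep (PySem.List.pyGetD t (i - 1) [])) c) := by
  induction js generalizing c with
  | nil => simp
  | cons j js ih =>
      simp only [List.foldl_cons]
      have hset : ∀ x : List Int, PySem.List.pySetD (t.set i.toNat c) i x = t.set i.toNat x := by
        intro x
        rw [PySem.List.pySetD_of_nonneg _ _ (by omega), List.set_set]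
      have hgi : PySem.List.pyGetD (t.set i.toNat c) i [] = c := by
        rw [PySem.List.pyGetD_eq_getElem _ _ (by omega) (by simp; omega)]
        simp [List.getElem_set_self]
      have hgp : PySem.List.pyGetD (t.set i.toNat c) (i - 1) [] = PySem.List.pyGetD t (i - 1) [] := by
        rw [PySem.List.pyGetD_eq_getElem _ _ (by omega) (by simp; omega),
            PySem.List.pyGetD_eq_getElem _ _ (by omega) (by omega)]
        rw [List.getElem_set_ne (by omega)]
      rw [hgi, hgp, hset, ih]
      rfl

-- A's row recurrence: prefix of the new comb row, suffix still the initial ones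
lemma rowA_inv (a n : Nat) (hn : 1 ≤ n) (k : Nat) (hk : k ≤ n - 1) :
    (PySem.List.pyRange 1 ((k : Int) + 1) 1).foldl (rowAstep (combRow a n)) (List.replicate n 1)
      = (combRow (a + 1) n).take (k + 1) ++ List.replicate (n - (k + 1)) 1 := by
  induction k with
  | zero =>
      rw [PySem.List.pyRange_one_eq_nil (by norm_num)]
      simp only [List.foldl_nil]
      obtain ⟨n', rfl⟩ : ∃ n', n = n' + 1 := ⟨n - 1, by omega⟩
      simp [combRow, List.range_succ_eq_map, List.replicate_succ]
  | succ k ih =>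
      have hk' : k ≤ n - 1 := by omega
      have hkn : k + 2 ≤ n := by omega
      rw [show ((k + 1 : Nat) : Int) + 1 = ((k : Int) + 1) + 1 by push_cast; ring,
          PySem.List.pyRange_one_succ_right (by omega), List.foldl_append, ih hk']
      have hlen : (combRow (a + 1) n).length = n := combRow_length _ _
      have hcl : ((combRow (a + 1) n).take (k + 1)).length = k + 1 := by simp [hlen]; omega
      simp only [List.foldl_cons, List.foldl_nil]
      unfold rowAstep
      have h1 : PySem.List.pyGetD (combRow a n) ((k : Int) + 1) 0 = ((a + (k + 1)).choose a : Int) := by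
        rw [show ((k : Int) + 1) = ((k + 1 : Nat) : Int) by push_cast; ring,
            PySem.List.pyGetD_natCast, List.getD_eq_getElem _ _ (by simp [combRow]; omega),
            combRow_getElem a n (k + 1) (by omega)]
      have h2 : PySem.List.pyGetD ((combRow (a + 1) n).take (k + 1) ++ List.replicate (n - (k + 1)) 1)
            ((k : Int) + 1 - 1) 0 = ((a + 1 + k).choose (a + 1) : Int) := by
        rw [show ((k : Int) + 1 - 1) = ((k : Nat) : Int) by ring,
            PySem.List.pyGetD_natCast, List.getD_eq_getElem _ _ (by simp [hcl]; omega),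
            List.getElem_append_left (by omega),
            List.getElem_take, combRow_getElem (a + 1) n k (by omega)]
      rw [h1, h2]
      have hp : ((a + (k + 1)).choose a : Int) + ((a + 1 + k).choose (a + 1) : Int)
          = ((a + 1 + (k + 1)).choose (a + 1) : Int) := by
        have := Nat.choose_succ_succ (a + k + 1) a
        have e1 : a + (k + 1) = a + k + 1 := by omega
        have e2 : a + 1 + k = a + k + 1 := by omega
        have e3 : a + 1 + (k + 1) = a + k + 1 + 1 := by omega
        rw [e1, e2, e3, this]
        push_cast; ring
      rw [hp]
      rw [PySem.List.pySetD_of_nonneg _ _ (by omega)]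
      rw [show ((k : Int) + 1).toNat = k + 1 by omega]
      rw [List.set_append_right _ _ (by omega), hcl]
      have hz : k + 1 - (k + 1) = 0 := by omega
      rw [hz]
      obtain ⟨d, hd⟩ : ∃ d, n - (k + 1) = d + 1 := ⟨n - (k + 2), by omega⟩
      rw [hd, List.replicate_succ, List.set_cons_zero]
      have htake : (combRow (a + 1) n).take (k + 1 + 1)
          = (combRow (a + 1) n).take (k + 1) ++ [((a + 1 + (k + 1)).choose (a + 1) : Int)] := by
        rw [List.take_add_one]
        congr 1
        rw [List.getElem?_eq_getElem (by omega), combRow_getElem (a + 1) n (k + 1) (by omega)]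
        rfl
      rw [htake, show n - (k + 1 + 1) = d by omega]
      simp [List.append_assoc]

lemma rowA_full (a N : Nat) (hN : 1 ≤ N) :
    (PySem.List.pyRange 1 (N : Int) 1).foldl (rowAstep (combRow a N)) (List.replicate N 1)
      = combRow (a + 1) N := by
  have hcast : ((N : Nat) : Int) = ((N - 1 : Nat) : Int) + 1 := by omega
  rw [hcast, rowA_inv a N hN (N - 1) (by omega)]
  rw [show N - 1 + 1 = N by omega]
  rw [List.take_of_length_le (by simp [combRow_length])]
  simp

-- A's table after the outer loop has processed rows 1..i
def tabUpto (m n i : Nat) : List (List Int) :=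
  (List.range m).map (fun r => if r ≤ i then combRow r n else List.replicate n 1)

lemma tabUpto_length (M N i : Nat) : (tabUpto M N i).length = M := by simp [tabUpto]

lemma tabUpto_set (M N i : Nat) (_h : i + 1 < M) :
    (tabUpto M N i).set (i + 1) (combRow (i + 1) N) = tabUpto M N (i + 1) := by
  apply List.ext_getElem
  · simp [tabUpto]
  · intro r h1 h2
    simp only [tabUpto, List.getElem_set, List.getElem_map, List.getElem_range]
    by_cases hcase : r = i + 1
    · simp [hcase]
    · rw [if_neg (by omega : ¬ (i + 1 = r))]
      by_cases hle : r ≤ i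
      · rw [if_pos hle, if_pos (by omega)]
      · rw [if_neg hle, if_neg (by omega)]

lemma outer_inv (M N : Nat) (hN : 1 ≤ N) (i : Nat) (hi : i < M) :
    (PySem.List.pyRange 1 ((i : Int) + 1) 1).foldl (fun t ii =>
        (PySem.List.pyRange 1 (N : Int) 1).foldl (fun t j =>
          PySem.List.pySetD t ii
            (PySem.List.pySetD (PySem.List.pyGetD t ii []) j
              (PySem.List.pyGetD (PySem.List.pyGetD t (ii - 1) []) j 0 +
               PySem.List.pyGetD (PySem.List.pyGetD t ii []) (j - 1) 0))) t)
      (List.replicate M (List.replicate N 1))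
      = tabUpto M N i := by
  induction i with
  | zero =>
      rw [PySem.List.pyRange_one_eq_nil (a := 1) (b := ((0 : Nat) : Int) + 1) (by norm_num)]
      simp only [List.foldl_nil]
      apply List.ext_getElem
      · simp [tabUpto]
      · intro r h1 h2
        simp only [tabUpto, List.getElem_replicate, List.getElem_map, List.getElem_range]
        by_cases hr : r ≤ 0
        · have : r = 0 := by omega
          simp [this, combRow_zero]
        · simp [hr]
  | succ i ih =>
      have hi' : i < M := by omega
      rw [show ((i + 1 : Nat) : Int) + 1 = ((i : Int) + 1) + 1 by push_cast; ring,
          PySem.List.pyRange_one_succ_right (by omega), List.foldl_append, ih hi']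
      simp only [List.foldl_cons, List.foldl_nil]
      have hlen : ((i : Int) + 1).toNat < (tabUpto M N i).length := by
        rw [tabUpto_length]; omega
      have hset : tabUpto M N i = (tabUpto M N i).set ((i : Int) + 1).toNat (List.replicate N 1) := by
        apply List.ext_getElem
        · simp
        · intro r h1 h2
          rw [List.getElem_set]
          split_ifs with hr
          · have : r = i + 1 := by omega
            subst this
            simp [tabUpto]
          · rfl
      conv_lhs => rw [hset]
      rw [tableInner_aux _ _ (by omega) _ hlen]
      have hprev : PySem.List.pyGetD (tabUpto M N i) ((i : Int) + 1 - 1) [] = combRow i N := by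
        rw [show ((i : Int) + 1 - 1) = ((i : Nat) : Int) by ring,
            PySem.List.pyGetD_natCast, List.getD_eq_getElem _ _ (by rw [tabUpto_length]; omega)]
        simp [tabUpto]
      rw [hprev, rowA_full i N hN,
          show ((i : Int) + 1).toNat = i + 1 by omega, tabUpto_set M N i (by omega)]

lemma aTab (m n : Int) (hm : 0 < m) (hn : 0 < n) :
    generar_tabla_caminos m n = combTab m.toNat n.toNat := by
  obtain ⟨M, rfl⟩ : ∃ M : Nat, m = (M : Int) := ⟨m.toNat, by omega⟩
  obtain ⟨N, rfl⟩ : ∃ N : Nat, n = (N : Int) := ⟨n.toNat, by omega⟩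
  unfold generar_tabla_caminos
  rw [if_neg (by simp; omega)]
  simp only [Int.toNat_natCast]
  have hinit : (PySem.List.pyRange 0 (M : Int) 1).map (fun _ => List.replicate N (1 : Int))
      = List.replicate M (List.replicate N 1) := by
    rw [List.map_const']
    congr 1
    rw [PySem.List.length_pyRange_one]
    omega
  rw [hinit]
  rw [show PySem.List.pyRange 1 (M : Int) 1 = PySem.List.pyRange 1 (((M - 1 : Nat) : Int) + 1) 1 by
        congr 1; omega]
  rw [outer_inv M N (by omega) (M - 1) (by omega)]
  unfold combTab tabUpto
  apply List.map_congr_left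
  intro r hr
  rw [if_pos (by simp at hr; omega)]

-- ===== VERDICT (by name: the statement is the Claim_ definition above) =====
theorem generar_tabla_caminos_spec : Claim_equal_generar_tabla_caminos := by
  intro m n _
  unfold Spec_generar_tabla_caminos
  by_cases hm : 0 < m
  · by_cases hn : 0 < n
    · rw [aTab m n hm hn, altB m n hm hn]
    · have hn' : n ≤ 0 := by omega
      simp [generar_tabla_caminos, generar_tabla_caminos_alt, hn']
  · have hm' : m ≤ 0 := by omega
    simp [generar_tabla_caminos, generar_tabla_caminos_alt, hm']
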